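-- pv_equiv track=rewrite | github.com/Adisha2/45-Days-Code | Day 6 - HOSTELROOM.py | max_people_in_room
-- ===== SOURCE A (Python) =====
-- def max_people_in_room(test_cases):
--     results = []
--
--     for case in test_cases:
--         N, X, A = case
--         current_people = X
--         max_people = X
--
--         for event in A:
--             current_people += event
--             if current_people > max_people:
--                 max_people = current_people
--
--         results.append(max_people)
--
--     return results
-- ===== SOURCE B (Python) =====
-- def max_people_in_room(test_cases):
--     # Backward suffix recurrence (Kadane-style): the peak occupancy is
--     # X plus the largest prefix-sum of A, and that largest prefix-sum M
--     # satisfies M([]) = 0, M(e::t) = max(0, e + M(t)); so one backward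
--     # pass with m = max(0, e + m) suffices -- no running occupancy counter.
--     def peak_above_start(events):
--         m = 0
--         for e in reversed(events):
--             m = max(0, e + m)
--         return m
--     return [X + peak_above_start(A) for N, X, A in test_cases]
-- ===== Notes on version B (the rewrite author's own statement) =====
-- stated objective: alternative
-- what changed: Replaces A's forward loop tracking current occupancy and running max by a backward Kadane-style suffix recurrence m = max(0, e + m) over reversed events, returning X + m; no occupancy counter or forward prefix sums are maintained.
import Mathlib
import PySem

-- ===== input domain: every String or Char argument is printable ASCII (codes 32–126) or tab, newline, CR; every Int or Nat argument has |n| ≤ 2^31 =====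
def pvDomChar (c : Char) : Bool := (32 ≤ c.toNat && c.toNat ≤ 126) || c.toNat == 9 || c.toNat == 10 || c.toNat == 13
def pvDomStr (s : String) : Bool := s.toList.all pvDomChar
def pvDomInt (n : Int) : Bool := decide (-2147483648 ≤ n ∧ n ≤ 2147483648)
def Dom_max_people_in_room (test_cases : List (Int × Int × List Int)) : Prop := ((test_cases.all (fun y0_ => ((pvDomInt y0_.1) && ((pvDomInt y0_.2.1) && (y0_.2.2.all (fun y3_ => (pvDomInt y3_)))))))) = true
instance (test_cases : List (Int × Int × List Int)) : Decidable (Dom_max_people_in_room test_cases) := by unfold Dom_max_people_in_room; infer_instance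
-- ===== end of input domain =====

-- B replaces A's forward loop (occupancy counter + running max) by a backward
-- Kadane-style suffix recurrence m = max(0, e+m) over reversed events, returning X + m
-- (alternative algorithm; same linear cost).

-- ===== PORT A =====
-- A's inner loop: state (current_people, max_people), branch kept literally
def max_people_in_room (test_cases : List (Int × Int × List Int)) : List Int :=
  test_cases.foldl
    (fun results case =>
      let X := case.2.1
      let A := case.2.2
      let final := A.foldl
        (fun st event =>
          let current := st.1 + event
          (current, if current > st.2 then current else st.2))
        (X, X)
      results ++ [final.2])
    []

-- ===== PORT B =====
-- peak_above_start: m = 0; for e in reversed(events): m = max(0, e + m)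
def peak_above_start (events : List Int) : Int :=
  events.reverse.foldl (fun m e => max 0 (e + m)) 0

def max_people_in_room_alt (test_cases : List (Int × Int × List Int)) : List Int :=
  test_cases.map (fun case => case.2.1 + peak_above_start case.2.2)

-- ===== PRECONDITION & SPEC =====
def Spec_max_people_in_room (test_cases : List (Int × Int × List Int)) (out : List Int) : Prop := out = max_people_in_room_alt test_cases
instance (test_cases : List (Int × Int × List Int)) (out : List Int) : Decidable (Spec_max_people_in_room test_cases out) := by unfold Spec_max_people_in_room; infer_instance

-- ===== CLAIM (what is proved, stated in full; the proofs are below) =====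
def Claim_equal_max_people_in_room : Prop := ∀ (test_cases : List (Int × Int × List Int)), Dom_max_people_in_room test_cases → Spec_max_people_in_room test_cases (max_people_in_room test_cases)

-- ===== LEMMAS AND PROOFS =====

-- B's backward loop is the right fold of the suffix recurrence
theorem peak_foldr (events : List Int) :
    peak_above_start events = events.foldr (fun e m => max 0 (e + m)) 0 := by
  unfold peak_above_start
  rw [List.foldl_reverse]

theorem peak_nonneg (events : List Int) : 0 ≤ peak_above_start events := by
  rw [peak_foldr]
  induction events with
  | nil => simp
  | cons e t ih => simp only [List.foldr_cons]; omega

-- A's inner loop from (c, m) with c ≤ m returns max m (c + peak_above_start A)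
theorem inner_eq (A : List Int) (c m : Int) (h : c ≤ m) :
    (A.foldl
      (fun st event =>
        let current := st.1 + event
        (current, if current > st.2 then current else st.2))
      (c, m)).2
    = max m (c + peak_above_start A) := by
  induction A generalizing c m with
  | nil =>
      simp only [List.foldl_nil, peak_above_start, List.reverse_nil, List.foldl_nil]
      omega
  | cons e t ih =>
      simp only [List.foldl_cons]
      have hle : c + e ≤ if c + e > m then c + e else m := by split_ifs <;> omega
      rw [ih (c + e) _ hle]
      have ht := peak_nonneg t
      rw [peak_foldr (e :: t), List.foldr_cons, ← peak_foldr t]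
      split_ifs <;> omega

theorem fold_append (tcs : List (Int × Int × List Int)) (acc : List Int) :
    tcs.foldl
      (fun results case =>
        let X := case.2.1
        let A := case.2.2
        let final := A.foldl
          (fun st event =>
            let current := st.1 + event
            (current, if current > st.2 then current else st.2))
          (X, X)
        results ++ [final.2])
      acc
    = acc ++ max_people_in_room_alt tcs := by
  induction tcs generalizing acc with
  | nil => simp [max_people_in_room_alt]
  | cons c tcs ih =>
      simp only [List.foldl_cons, max_people_in_room_alt, List.map_cons]
      rw [ih]
      have := inner_eq c.2.2 c.2.1 c.2.1 le_rfl
      simp only [this, max_people_in_room_alt]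
      have hp := peak_nonneg c.2.2
      have : max c.2.1 (c.2.1 + peak_above_start c.2.2) = c.2.1 + peak_above_start c.2.2 := by omega
      rw [this]
      simp

-- ===== VERDICT (by name: the statement is the Claim_ definition above) =====
theorem max_people_in_room_spec : Claim_equal_max_people_in_room := by
  intro tcs _
  unfold Spec_max_people_in_room max_people_in_room
  rw [fold_append]
  simp
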